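-- pv_equiv track=rewrite | github.com/pypi-data/pypi-mirror-87 | packages/Swift-CCF-Kravchuk/Swift_CCF_Kravchuk-0.0.1-py3-none-any.whl/util/util.py | next_separator_without_spaces_index
-- ===== SOURCE A (Python) =====
-- SEPARATORS = [" ", "\n", "\r", "{", "}", "=", ">",
--               "<", ":", "?", ",", "\"", "\'", "(", ")"]
--
-- def next_separator_without_spaces_index(data):
--     """Get index of next separator
--     that is not a space"""
--
--     tmp_seps = SEPARATORS[:]
--     tmp_seps.remove(" ")
--     tmp_seps.remove("\n")
--     tmp_seps.remove("\r")
--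
--     for i in range(0, len(data)):
--         if data[i] in tmp_seps:
--             return i
--
--         elif data[i] in [" ", "\n", "\r"]:
--             continue
--
--         break
--
--     return None  # EOF or non-separator
-- ===== SOURCE B (Python) =====
-- NONSPACE_SEPARATORS = "{}=><:?,\"'()"
--
-- def next_separator_without_spaces_index(data):
--     """Get index of next separator
--     that is not a space"""
--     # Staged: find the earliest occurrence of any non-space separator,
--     # then accept it only if everything before it is whitespace.
--     hits = [data.index(s) for s in NONSPACE_SEPARATORS if s in data]
--     if not hits:
--         return None
--     idx = min(hits)
--     if all(c in " \n\r" for c in data[:idx]):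
--         return idx
--     return None
-- ===== Notes on version B (the rewrite author's own statement) =====
-- stated objective: alternative
-- what changed: Instead of A's single left-to-right scan with continue/break, B runs staged passes: it collects data.index(s) for each non-space separator present, takes the minimum hit, and accepts it only if the prefix before it is all whitespace.
import Mathlib
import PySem

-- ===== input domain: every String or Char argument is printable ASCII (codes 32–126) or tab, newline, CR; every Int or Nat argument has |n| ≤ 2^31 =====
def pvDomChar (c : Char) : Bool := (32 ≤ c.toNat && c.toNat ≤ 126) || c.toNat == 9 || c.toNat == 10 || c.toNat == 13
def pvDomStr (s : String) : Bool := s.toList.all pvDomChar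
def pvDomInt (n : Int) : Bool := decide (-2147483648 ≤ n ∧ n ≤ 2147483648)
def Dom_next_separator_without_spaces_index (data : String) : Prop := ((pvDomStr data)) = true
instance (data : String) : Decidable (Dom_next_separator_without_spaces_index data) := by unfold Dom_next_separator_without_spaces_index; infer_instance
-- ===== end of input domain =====

-- B changes: instead of A's single left-to-right scan with continue/break, B finds the
-- earliest occurrence of each non-space separator, takes the minimum hit, and accepts it
-- only if the prefix before it is all whitespace (objective: alternative).

-- ===== PORT A =====
-- A's separator list and the three remove(" "), remove("\n"), remove("\r") calls; each
-- element removed is present, so remove? always returns some and getD [] is exact.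
def pvSepList : List Char := [' ', '\n', '\r', '{', '}', '=', '>', '<', ':', '?', ',', '"', '\'', '(', ')']
def pvTmpSeps : List Char :=
  (PySem.List.remove? ((PySem.List.remove? ((PySem.List.remove? pvSepList ' ').getD []) '\n').getD []) '\r').getD []

-- A's for-loop over range(0, len(data)) with early return / continue / break,
-- as structural recursion over the characters carrying the current index i.
def pvLoopA : List Char → Int → Option Int
  | [], _ => none
  | c :: rest, i =>
    if c ∈ pvTmpSeps then some i
    else if c ∈ [' ', '\n', '\r'] then pvLoopA rest (i + 1)
    else none

def next_separator_without_spaces_index (data : String) : Option Int :=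
  pvLoopA data.toList 0

-- ===== PORT B =====
def pvNonspaceSeps : List Char := ['{', '}', '=', '>', '<', ':', '?', ',', '"', '\'', '(', ')']

def pvIsWs (c : Char) : Bool := c = ' ' || c = '\n' || c = '\r'   -- c in " \n\r"

def next_separator_without_spaces_index_alt (data : String) : Option Int :=
  let l := data.toList
  -- hits = [data.index(s) for s in NONSPACE_SEPARATORS if s in data]
  let hits := pvNonspaceSeps.filterMap (fun s => if s ∈ l then PySem.List.index? l s else none)
  match PySem.List.min? hits (fun x => x) with    -- if not hits: return None; idx = min(hits)
  | none => none
  | some idx => if (l.take idx).all pvIsWs then some (idx : Int) else none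

-- ===== PRECONDITION & SPEC =====
def Spec_next_separator_without_spaces_index (data : String) (out : Option Int) : Prop := out = next_separator_without_spaces_index_alt data
instance (data : String) (out : Option Int) : Decidable (Spec_next_separator_without_spaces_index data out) := by unfold Spec_next_separator_without_spaces_index; infer_instance

-- ===== CLAIM (what is proved, stated in full; the proofs are below) =====
def Claim_equal_next_separator_without_spaces_index : Prop := ∀ (data : String), Dom_next_separator_without_spaces_index data → Spec_next_separator_without_spaces_index data (next_separator_without_spaces_index data)

-- ===== LEMMAS AND PROOFS =====
lemma tmpSeps_eq : pvTmpSeps = pvNonspaceSeps := by decide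

lemma mem_seps_not_ws {c : Char} (h : c ∈ pvNonspaceSeps) : pvIsWs c = false := by
  fin_cases h <;> decide

-- A computes the dropWhile characterization: index of the whitespace prefix end,
-- accepted iff the first non-whitespace char is a non-space separator.
lemma pvLoopA_key : ∀ (l : List Char) (i : Int), pvLoopA l i =
    (match l.dropWhile pvIsWs with
     | [] => none
     | c :: _ =>
       if c ∈ pvNonspaceSeps then
         some (i + ((l.length : Int) - ((l.dropWhile pvIsWs).length : Int)))
       else none)
  | [], i => by simp [pvLoopA, List.dropWhile]
  | c :: rest, i => by
    rw [pvLoopA, tmpSeps_eq]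
    by_cases hsep : c ∈ pvNonspaceSeps
    · have hws := mem_seps_not_ws hsep
      simp [hsep, List.dropWhile, hws]
    · by_cases hws : pvIsWs c = true
      · have hmem : c ∈ [' ', '\n', '\r'] := by
          simp [pvIsWs] at hws
          rcases hws with (h | h) | h <;> simp [h]
        have hlen : ((rest.dropWhile pvIsWs).length) ≤ rest.length :=
          List.length_dropWhile_le _ _
        rw [if_neg hsep, if_pos hmem, pvLoopA_key rest (i + 1)]
        simp only [List.dropWhile, hws]
        cases hdl : rest.dropWhile pvIsWs with
        | nil => simp
        | cons d ds =>
          simp only []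
          by_cases hd : d ∈ pvNonspaceSeps
          · rw [if_pos hd, if_pos hd]
            congr 1
            rw [hdl] at hlen
            simp only [List.length_cons]
            push_cast
            omega
          · rw [if_neg hd, if_neg hd]
      · have hmem : c ∉ [' ', '\n', '\r'] := by
          simp [pvIsWs] at hws
          obtain ⟨⟨h1, h2⟩, h3⟩ := hws
          simp [h1, h2, h3]
        rw [if_neg hsep, if_neg hmem]
        simp only [List.dropWhile, hws]
        rw [if_neg hsep]

-- every hit of B comes from a separator occurring in l, at that index
lemma hit_spec {l : List Char} {j : Nat}
    (hj : j ∈ pvNonspaceSeps.filterMap (fun s => if s ∈ l then PySem.List.index? l s else none)) :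
    ∃ c ∈ pvNonspaceSeps, PySem.List.index? l c = some j := by
  rcases List.mem_filterMap.mp hj with ⟨c, hc, hcj⟩
  by_cases h : c ∈ l
  · exact ⟨c, hc, by simpa [h] using hcj⟩
  · simp [h] at hcj

-- every hit is at or after the end of the whitespace prefix
lemma hit_ge {l : List Char} {j : Nat}
    (hj : j ∈ pvNonspaceSeps.filterMap (fun s => if s ∈ l then PySem.List.index? l s else none)) :
    (l.takeWhile pvIsWs).length ≤ j := by
  rcases hit_spec hj with ⟨c, hc, hidx⟩
  rw [PySem.List.index?_eq_some_iff] at hidx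
  rcases hidx with ⟨pre, suf, hl, hlenp, -⟩
  by_contra h
  rw [not_le] at h
  -- take (j+1) of l two ways: it is pre ++ [c] and a prefix of the whitespace prefix
  have h1 : l.take (j + 1) = pre ++ [c] := by
    rw [hl, List.take_append, List.take_of_length_le (by omega)]
    congr 1
    have : j + 1 - pre.length = 1 := by omega
    rw [this, List.take_succ_cons, List.take_zero]
  have h2 : l.take (j + 1) = (l.takeWhile pvIsWs).take (j + 1) := by
    conv_lhs => rw [← List.takeWhile_append_dropWhile (p := pvIsWs) (l := l)]
    rw [List.take_append]
    have hz : j + 1 - (l.takeWhile pvIsWs).length = 0 := by omega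
    rw [hz, List.take_zero, List.append_nil]
  have hcmem : c ∈ (l.takeWhile pvIsWs).take (j + 1) := by
    rw [← h2, h1]; simp
  have hcws : pvIsWs c = true :=
    List.mem_takeWhile_imp (List.take_subset _ _ hcmem)
  rw [mem_seps_not_ws hc] at hcws
  exact Bool.false_ne_true hcws

-- B computes the same dropWhile characterization
lemma altB_key (l : List Char) :
    (match PySem.List.min?
        (pvNonspaceSeps.filterMap (fun s => if s ∈ l then PySem.List.index? l s else none))
        (fun x => x) with
     | none => none
     | some idx => if (l.take idx).all pvIsWs then some (idx : Int) else none)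
    = (match l.dropWhile pvIsWs with
       | [] => none
       | c :: _ =>
         if c ∈ pvNonspaceSeps then
           some ((l.length : Int) - ((l.dropWhile pvIsWs).length : Int))
         else none) := by
  have hsplit0 : l = l.takeWhile pvIsWs ++ l.dropWhile pvIsWs :=
    (List.takeWhile_append_dropWhile).symm
  cases hd : l.dropWhile pvIsWs with
  | nil =>
    rw [hd, List.append_nil] at hsplit0
    have hall : ∀ x ∈ l, pvIsWs x = true := by
      intro x hx
      rw [hsplit0] at hx
      exact List.mem_takeWhile_imp hx
    have hempty : pvNonspaceSeps.filterMap (fun s => if s ∈ l then PySem.List.index? l s else none) = [] := by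
      rw [List.filterMap_eq_nil_iff]
      intro c hc
      have hcl : c ∉ l := fun hcl => by
        have := hall c hcl
        rw [mem_seps_not_ws hc] at this
        exact Bool.false_ne_true this
      simp [hcl]
    rw [hempty]
    simp [PySem.List.min?]
  | cons c0 rest =>
    rw [hd] at hsplit0
    have hk : (l.takeWhile pvIsWs).length + rest.length + 1 = l.length := by
      conv_rhs => rw [hsplit0]
      simp [List.length_append]
      omega
    cases hm : PySem.List.min?
        (pvNonspaceSeps.filterMap (fun s => if s ∈ l then PySem.List.index? l s else none))
        (fun x => x) with
    | none =>
      -- min over an empty hit list: no separator occurs, in particular c0 ∉ seps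
      rw [PySem.List.min?_eq_none_iff] at hm
      have hempty := hm
      have hc0 : c0 ∉ pvNonspaceSeps := by
        intro hc0
        have hc0p : c0 ∉ l.takeWhile pvIsWs := fun hmem => by
          have := List.mem_takeWhile_imp hmem
          rw [mem_seps_not_ws hc0] at this
          exact Bool.false_ne_true this
        have hidx : PySem.List.index? l c0 = some (l.takeWhile pvIsWs).length := by
          rw [PySem.List.index?_eq_some_iff]
          exact ⟨l.takeWhile pvIsWs, rest, hsplit0, rfl, hc0p⟩
        have hc0l : c0 ∈ l := by rw [hsplit0]; simp
        have : (l.takeWhile pvIsWs).length ∈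
            pvNonspaceSeps.filterMap (fun s => if s ∈ l then PySem.List.index? l s else none) :=
          List.mem_filterMap.mpr ⟨c0, hc0, by simp [hc0l]; exact hidx⟩
        rw [hempty] at this
        exact absurd this (List.not_mem_nil)
      simp [hc0]
    | some m =>
      have hmm := PySem.List.min?_mem hm
      have hge : (l.takeWhile pvIsWs).length ≤ m := hit_ge hmm
      by_cases hc0 : c0 ∈ pvNonspaceSeps
      · -- the minimum hit is exactly the whitespace-prefix length
        have hc0p : c0 ∉ l.takeWhile pvIsWs := fun hmem => by
          have := List.mem_takeWhile_imp hmem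
          rw [mem_seps_not_ws hc0] at this
          exact Bool.false_ne_true this
        have hidx : PySem.List.index? l c0 = some (l.takeWhile pvIsWs).length := by
          rw [PySem.List.index?_eq_some_iff]
          exact ⟨l.takeWhile pvIsWs, rest, hsplit0, rfl, hc0p⟩
        have hc0l : c0 ∈ l := by rw [hsplit0]; simp
        have hkmem : (l.takeWhile pvIsWs).length ∈
            pvNonspaceSeps.filterMap (fun s => if s ∈ l then PySem.List.index? l s else none) :=
          List.mem_filterMap.mpr ⟨c0, hc0, by simp [hc0l]; exact hidx⟩
        have hle : m ≤ (l.takeWhile pvIsWs).length := PySem.List.min?_isMin hm _ hkmem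
        have hmk : m = (l.takeWhile pvIsWs).length := le_antisymm hle hge
        have htake : l.take m = l.takeWhile pvIsWs := by
          conv_lhs => rw [hsplit0]
          rw [hmk, List.take_append, List.take_of_length_le (le_refl _)]
          simp
        have hallp : (l.take m).all pvIsWs = true := by
          rw [htake, List.all_eq_true]
          exact fun x hx => List.mem_takeWhile_imp hx
        show (if (l.take m).all pvIsWs then some (m : Int) else none)
            = if c0 ∈ pvNonspaceSeps then some ((l.length : Int) - ((c0 :: rest).length : Int)) else none
        rw [hallp, if_pos rfl, if_pos hc0, hmk]
        congr 1
        simp only [List.length_cons]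
        push_cast [← hk]
        omega
      · -- the first non-whitespace char is not a separator: the prefix check fails
        have hc0ws : pvIsWs c0 = false := by
          have h := List.head_dropWhile_not (p := pvIsWs) (l := l) (by rw [hd]; simp)
          simp [hd] at h
          exact h
        have hne : m ≠ (l.takeWhile pvIsWs).length := by
          intro he
          rcases hit_spec hmm with ⟨c, hc, hidxc⟩
          rw [PySem.List.index?_eq_some_iff] at hidxc
          rcases hidxc with ⟨pre, suf, hpre, hlenp, -⟩
          have hinj := List.append_inj (hpre.symm.trans hsplit0) (by rw [hlenp, he])
          rcases hinj with ⟨-, heq⟩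
          injection heq with h1 h2
          rw [h1] at hc
          exact hc0 hc
        have hkm : (l.takeWhile pvIsWs).length < m := lt_of_le_of_ne hge (fun h => hne h.symm)
        have htm : l.take m = l.takeWhile pvIsWs ++ (c0 :: rest).take (m - (l.takeWhile pvIsWs).length) := by
          conv_lhs => rw [hsplit0]
          rw [List.take_append, List.take_of_length_le (by omega)]
        have hfalse : (l.take m).all pvIsWs = false := by
          rw [Bool.eq_false_iff]
          intro hall
          rw [List.all_eq_true] at hall
          obtain ⟨d, hdd⟩ : ∃ d, m - (l.takeWhile pvIsWs).length = d + 1 := ⟨m - (l.takeWhile pvIsWs).length - 1, by omega⟩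
          have hc0mem : c0 ∈ l.take m := by rw [htm, hdd, List.take_succ_cons]; simp
          have := hall c0 hc0mem
          rw [hc0ws] at this
          exact Bool.false_ne_true this
        show (if (l.take m).all pvIsWs then some (m : Int) else none)
            = if c0 ∈ pvNonspaceSeps then some ((l.length : Int) - ((c0 :: rest).length : Int)) else none
        rw [hfalse, if_neg hc0]
        simp

-- ===== VERDICT (by name: the statement is the Claim_ definition above) =====
theorem next_separator_without_spaces_index_spec : Claim_equal_next_separator_without_spaces_index := by
  intro data _
  unfold Spec_next_separator_without_spaces_index next_separator_without_spaces_index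
    next_separator_without_spaces_index_alt
  rw [pvLoopA_key, altB_key]
  cases (data.toList.dropWhile pvIsWs) with
  | nil => rfl
  | cons c cs => by_cases h : c ∈ pvNonspaceSeps <;> simp [h]
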